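-- pv_equiv track=rewrite | github.com/LalithK90/domain-security-audit | src/security_scanner.py | apply_exclusions
-- ===== SOURCE A (Python) =====
-- from typing import Any, Dict, List, Optional, Set
--
-- def apply_exclusions(subdomains: Set[str], exclusions: Optional[List[str]]) -> Set[str]:
--     if not exclusions:
--         return subdomains
--     lowered = [x.lower() for x in exclusions]
--     filtered = set()
--     for host in subdomains:
--         h = host.lower()
--         if any(ex in h for ex in lowered):
--             continue
--         filtered.add(host)
--     return filtered
-- ===== SOURCE B (Python) =====
-- def apply_exclusions(subdomains, exclusions):
--     if not exclusions:
--         return subdomains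
--     pairs = [(host, host.lower()) for host in subdomains]
--     for ex in exclusions:
--         needle = ex.lower()
--         pairs = [p for p in pairs if needle not in p[1]]
--     return {host for host, _ in pairs}
-- ===== Notes on version B (the rewrite author's own statement) =====
-- stated objective: alternative
-- what changed: Loop nesting is inverted: instead of A's per-host any()-scan over a precomputed lowered exclusion list accumulated with set.add, B pairs each host with its lowercase form once and then folds over the exclusions, each pass filtering the surviving (host, lowered) pairs with a single needle, building the result set only at the end.
import Mathlib
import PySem

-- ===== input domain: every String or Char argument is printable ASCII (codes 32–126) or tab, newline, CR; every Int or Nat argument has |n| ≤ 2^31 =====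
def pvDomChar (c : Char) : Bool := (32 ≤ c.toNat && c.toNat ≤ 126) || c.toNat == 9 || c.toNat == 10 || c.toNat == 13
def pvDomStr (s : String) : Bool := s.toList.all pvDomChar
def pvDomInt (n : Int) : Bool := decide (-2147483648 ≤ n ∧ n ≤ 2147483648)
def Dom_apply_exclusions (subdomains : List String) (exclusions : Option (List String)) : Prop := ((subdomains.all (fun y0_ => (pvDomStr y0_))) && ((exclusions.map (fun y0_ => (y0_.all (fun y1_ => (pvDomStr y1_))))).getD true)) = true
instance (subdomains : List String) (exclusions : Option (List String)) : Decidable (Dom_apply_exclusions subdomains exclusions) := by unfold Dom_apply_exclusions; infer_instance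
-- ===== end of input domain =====

-- B inverts A's loop nesting: it pairs each host with its lowercase form once, then folds over the
-- exclusions, each pass filtering the surviving pairs with one needle (objective: alternative structure, same cost).

-- ===== PORT A =====
def apply_exclusions (subdomains : List String) (exclusions : Option (List String)) : List String :=
  match exclusions with
  | none => subdomains
  | some exs =>
    if exs = [] then subdomains
    else
      let lowered := exs.map PySem.Str.lower
      subdomains.foldl
        (fun filtered host =>
          let h := PySem.Str.lower host
          if lowered.any (fun ex => PySem.Str.isIn ex h) then filtered
          else PySem.Set.add filtered host)
        PySem.Set.empty

-- ===== PORT B =====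
def apply_exclusions_alt (subdomains : List String) (exclusions : Option (List String)) : List String :=
  match exclusions with
  | none => subdomains
  | some exs =>
    if exs = [] then subdomains
    else
      let pairs := subdomains.map (fun host => (host, PySem.Str.lower host))
      let final := exs.foldl
        (fun pairs ex =>
          let needle := PySem.Str.lower ex
          pairs.filter (fun p => !(PySem.Str.isIn needle p.2)))
        pairs
      PySem.Set.ofList (final.map (fun p => p.1))

-- ===== PRECONDITION & SPEC =====
def Spec_apply_exclusions (subdomains : List String) (exclusions : Option (List String)) (out : List String) : Prop := out = apply_exclusions_alt subdomains exclusions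
instance (subdomains : List String) (exclusions : Option (List String)) (out : List String) : Decidable (Spec_apply_exclusions subdomains exclusions out) := by unfold Spec_apply_exclusions; infer_instance

-- ===== CLAIM (what is proved, stated in full; the proofs are below) =====
def Claim_equal_apply_exclusions : Prop := ∀ (subdomains : List String) (exclusions : Option (List String)), Dom_apply_exclusions subdomains exclusions → Spec_apply_exclusions subdomains exclusions (apply_exclusions subdomains exclusions)

-- ===== LEMMAS AND PROOFS =====

-- A's loop shape: skip-on-condition foldl with Set.add = Set.ofList of the filtered list.
theorem foldl_skipIf_add_eq (l : List String) (p : String → Bool) (s : List String) :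
    l.foldl (fun acc x => if p x then acc else PySem.Set.add acc x) s
      = (l.filter (fun x => !p x)).foldl PySem.Set.add s := by
  induction l generalizing s with
  | nil => rfl
  | cons x xs ih =>
    by_cases h : p x = true <;> simp [List.foldl_cons, h, ih]

-- B's loop shape: fold of one-needle filter passes = one filter by "all needles miss".
theorem foldl_filter_all (exs : List String) (ps : List (String × String)) :
    exs.foldl
      (fun ps ex => ps.filter (fun p => !(PySem.Str.isIn (PySem.Str.lower ex) p.2))) ps
      = ps.filter (fun p => exs.all (fun ex => !(PySem.Str.isIn (PySem.Str.lower ex) p.2))) := by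
  induction exs generalizing ps with
  | nil => simp
  | cons e rs ih =>
    rw [List.foldl_cons, ih, List.filter_filter]
    apply List.filter_congr
    intro a _
    simp [Bool.and_comm]

-- ===== VERDICT (by name: the statement is the Claim_ definition above) =====
theorem apply_exclusions_spec : Claim_equal_apply_exclusions := by
  intro subdomains exclusions _
  unfold Spec_apply_exclusions apply_exclusions apply_exclusions_alt
  match exclusions with
  | none => rfl
  | some exs =>
    by_cases hnil : exs = []
    · simp [hnil]
    · simp only [hnil, if_false]
      rw [foldl_skipIf_add_eq, foldl_filter_all, List.filter_map]
      show PySem.Set.ofList _ = PySem.Set.ofList _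
      rw [List.map_map]
      have : ∀ l : List String, l.map ((fun p : String × String => p.1) ∘ (fun host => (host, PySem.Str.lower host))) = l := by
        intro l; simp [Function.comp_def]
      rw [this]
      congr 1
      apply List.filter_congr
      intro a _
      simp [Function.comp_def, List.all_eq_not_any_not, PySem.Str.toList_lower, pysem]
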